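-- pv_equiv track=rewrite | github.com/z3z1ma/dbt-osmosis | src/dbt_osmosis/core/voice_learning.py | _extract_common_phrases
-- ===== SOURCE A (Python) =====
-- from collections import Counter
--
-- def _extract_common_phrases(
--     descriptions: list[str],
--     min_frequency: int = 2,
-- ) -> list[tuple[str, int]]:
--     """Extract frequently used phrases from descriptions.
--
--     Args:
--         descriptions: List of description strings
--         min_frequency: Minimum occurrence count to include
--
--     Returns:
--         List of (phrase, count) tuples sorted by frequency
--     """
--     if not descriptions:
--         return []
--
--     # Tokenize and extract n-grams (2-4 words)
--     words_by_desc = [d.lower().split() for d in descriptions if d and d.strip()]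
--
--     phrases: Counter[str] = Counter()
--
--     for words in words_by_desc:
--         # Extract 2-grams, 3-grams, and 4-grams
--         for n in [2, 3, 4]:
--             for i in range(len(words) - n + 1):
--                 phrase = " ".join(words[i : i + n])
--                 # Filter out very common words
--                 if not any(
--                     w in ["the", "a", "an", "of", "in", "and", "or", "for"] for w in phrase.split()
--                 ):
--                     phrases[phrase] += 1
--
--     # Return most common phrases above threshold
--     return [(p, c) for p, c in phrases.most_common(20) if c >= min_frequency]
-- ===== SOURCE B (Python) =====
-- from collections import Counter
--
-- def _extract_common_phrases(
--     descriptions: list[str],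
--     min_frequency: int = 2,
-- ) -> list[tuple[str, int]]:
--     stop = {"the", "a", "an", "of", "in", "and", "or", "for"}
--     # Stage 1: partition each description's words into maximal stopword-free runs.
--     segments_by_desc = []
--     for d in descriptions:
--         if d and d.strip():
--             segs, cur = [], []
--             for w in d.lower().split():
--                 if w in stop:
--                     if cur:
--                         segs.append(cur)
--                         cur = []
--                 else:
--                     cur.append(w)
--             if cur:
--                 segs.append(cur)
--             segments_by_desc.append(segs)
--     # Stage 2: every contiguous n-gram inside a run is stopword-free by construction.
--     phrases = Counter()
--     for segs in segments_by_desc: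
--         for n in (2, 3, 4):
--             for seg in segs:
--                 for i in range(len(seg) - n + 1):
--                     phrases[" ".join(seg[i : i + n])] += 1
--     return [(p, c) for p, c in phrases.most_common(20) if c >= min_frequency]
-- ===== Notes on version B (the rewrite author's own statement) =====
-- stated objective: alternative
-- what changed: B first partitions each description's word list into maximal stopword-free runs (cutting at stopwords) and then counts every contiguous 2/3/4-gram inside a run, so the per-phrase join-then-resplit stopword test of A disappears entirely; counts and first-insertion tie order are identical.
import Mathlib
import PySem

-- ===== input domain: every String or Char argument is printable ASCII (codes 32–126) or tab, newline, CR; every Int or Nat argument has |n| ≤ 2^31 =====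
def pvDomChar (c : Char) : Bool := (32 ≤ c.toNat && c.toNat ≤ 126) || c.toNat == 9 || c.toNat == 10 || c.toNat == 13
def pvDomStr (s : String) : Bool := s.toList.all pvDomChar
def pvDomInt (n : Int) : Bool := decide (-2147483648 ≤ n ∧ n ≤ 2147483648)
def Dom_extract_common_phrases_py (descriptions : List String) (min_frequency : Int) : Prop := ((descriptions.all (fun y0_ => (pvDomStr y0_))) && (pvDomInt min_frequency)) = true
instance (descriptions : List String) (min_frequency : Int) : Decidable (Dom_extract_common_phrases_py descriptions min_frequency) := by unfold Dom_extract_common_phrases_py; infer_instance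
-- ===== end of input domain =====

-- B first partitions each description's word list into maximal stopword-free runs (cutting at
-- stopwords), then counts every contiguous 2/3/4-gram inside a run — no per-phrase stopword
-- test, no join-then-resplit; objective: alternative (same counts and same insertion order).

-- ===== PORT A =====
def extract_common_phrases_py (descriptions : List String) (min_frequency : Int) : List (String × Int) :=
  if descriptions = [] then []
  else
    let words_by_desc := (descriptions.filter (fun d => !(d == "") && !(PySem.Str.strip d == ""))).map
      (fun d => PySem.Str.split₀ (PySem.Str.lower d))
    let phrases := words_by_desc.foldl (fun ph words =>
      ([2, 3, 4] : List Int).foldl (fun ph n =>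
        (PySem.List.pyRange 0 ((words.length : Int) - n + 1) 1).foldl (fun ph i =>
          let phrase := PySem.Str.join " " (PySem.List.slice words (some i) (some (i + n)))
          if (PySem.Str.split₀ phrase).any
              (fun w => ["the", "a", "an", "of", "in", "and", "or", "for"].contains w) then ph
          else ph.modify phrase 0 (· + 1)) ph) ph) (PySem.Dict.empty)
    ((PySem.List.sorted phrases.items (fun pc => pc.2) true).take 20).filter
      (fun pc => decide (min_frequency ≤ pc.2))

-- ===== PORT B =====
def extract_common_phrases_py_alt (descriptions : List String) (min_frequency : Int) : List (String × Int) :=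
  let stop := ["the", "a", "an", "of", "in", "and", "or", "for"]
  -- stage 1: maximal stopword-free runs of each kept description
  let segments_by_desc := descriptions.foldl (fun sbd d =>
    if !(d == "") && !(PySem.Str.strip d == "") then
      let st := (PySem.Str.split₀ (PySem.Str.lower d)).foldl
        (fun (sc : List (List String) × List String) w =>
          if stop.contains w then (if sc.2.isEmpty then sc else (sc.1 ++ [sc.2], ([] : List String)))
          else (sc.1, sc.2 ++ [w])) ([], [])
      sbd ++ [if st.2.isEmpty then st.1 else st.1 ++ [st.2]]
    else sbd) []
  -- stage 2: every contiguous n-gram inside a run is stopword-free by construction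
  let phrases := segments_by_desc.foldl (fun ph segs =>
    ([2, 3, 4] : List Int).foldl (fun ph n =>
      segs.foldl (fun ph seg =>
        (PySem.List.pyRange 0 ((seg.length : Int) - n + 1) 1).foldl (fun ph i =>
          ph.modify (PySem.Str.join " " (PySem.List.slice seg (some i) (some (i + n)))) 0 (· + 1))
          ph) ph) ph) (PySem.Dict.empty)
  ((PySem.List.sorted phrases.items (fun pc => pc.2) true).take 20).filter
    (fun pc => decide (min_frequency ≤ pc.2))

-- ===== PRECONDITION & SPEC =====
def Spec_extract_common_phrases_py (descriptions : List String) (min_frequency : Int) (out : List (String × Int)) : Prop := out = extract_common_phrases_py_alt descriptions min_frequency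
instance (descriptions : List String) (min_frequency : Int) (out : List (String × Int)) : Decidable (Spec_extract_common_phrases_py descriptions min_frequency out) := by unfold Spec_extract_common_phrases_py; infer_instance

-- ===== CLAIM (what is proved, stated in full; the proofs are below) =====
def Claim_equal_extract_common_phrases_py : Prop := ∀ (descriptions : List String) (min_frequency : Int), Dom_extract_common_phrases_py descriptions min_frequency → Spec_extract_common_phrases_py descriptions min_frequency (extract_common_phrases_py descriptions min_frequency)

-- ===== LEMMAS AND PROOFS =====

-- ---- split₀.go characterisation ----
theorem pv_go_acc (s cur : List Char) (acc : List (List Char)) :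
    PySem.Chars.split₀.go s cur acc = acc.reverse ++ PySem.Chars.split₀.go s cur [] := by
  induction s generalizing cur acc with
  | nil =>
    simp only [PySem.Chars.split₀.go]
    split_ifs <;> simp
  | cons c rest ih =>
    simp only [PySem.Chars.split₀.go]
    split_ifs with h1 h2
    · exact ih [] acc
    · rw [ih [] (cur.reverse :: acc), ih [] [cur.reverse]]; simp
    · rw [ih (c :: cur) acc]

theorem pv_go_word (w s cur : List Char) (acc : List (List Char))
    (hw : ∀ c ∈ w, PySem.Chars.isspace c = false) :
    PySem.Chars.split₀.go (w ++ s) cur acc = PySem.Chars.split₀.go s (w.reverse ++ cur) acc := by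
  induction w generalizing cur with
  | nil => simp
  | cons c w' ih =>
    have hc : PySem.Chars.isspace c = false := hw c (by simp)
    simp only [List.cons_append, PySem.Chars.split₀.go, hc, Bool.false_eq_true, if_false]
    rw [ih (c :: cur) (fun x hx => hw x (by simp [hx]))]
    simp

theorem pv_go_mem (s cur : List Char) (acc : List (List Char))
    (hcur : ∀ c ∈ cur, PySem.Chars.isspace c = false)
    (hacc : ∀ w ∈ acc, w ≠ [] ∧ ∀ c ∈ w, PySem.Chars.isspace c = false) :
    ∀ w ∈ PySem.Chars.split₀.go s cur acc, w ≠ [] ∧ ∀ c ∈ w, PySem.Chars.isspace c = false := by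
  induction s generalizing cur acc with
  | nil =>
    simp only [PySem.Chars.split₀.go]
    split_ifs with h
    · intro w hw; exact hacc w (List.mem_reverse.mp hw)
    · intro w hw
      rcases List.mem_cons.mp (List.mem_reverse.mp hw) with h' | h'
      · subst h'
        refine ⟨by simpa [List.isEmpty_iff] using h, fun c hc => hcur c (List.mem_reverse.mp hc)⟩
      · exact hacc w h'
  | cons c rest ih =>
    simp only [PySem.Chars.split₀.go]
    split_ifs with h1 h2
    · exact ih [] acc (by simp) hacc
    · refine ih [] (cur.reverse :: acc) (by simp) ?_
      intro w hw
      rcases List.mem_cons.mp hw with h' | h'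
      · subst h'
        exact ⟨by simpa [List.isEmpty_iff] using h2, fun x hx => hcur x (List.mem_reverse.mp hx)⟩
      · exact hacc w h'
    · refine ih (c :: cur) acc ?_ hacc
      intro x hx
      rcases List.mem_cons.mp hx with h' | h'
      · subst h'; simpa using h1
      · exact hcur x h'

theorem pv_split₀_join (ws : List (List Char)) (hne : ws ≠ [])
    (h : ∀ w ∈ ws, w ≠ [] ∧ ∀ c ∈ w, PySem.Chars.isspace c = false) :
    PySem.Chars.split₀ (PySem.Chars.join [' '] ws) = ws := by
  induction ws with
  | nil => simp at hne
  | cons w tail ih =>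
    obtain ⟨hwne, hwns⟩ := h w (by simp)
    cases tail with
    | nil =>
      show PySem.Chars.split₀.go (PySem.Chars.join [' '] [w]) [] [] = [w]
      rw [PySem.Chars.join_singleton]
      rw [show w = w ++ [] by simp, pv_go_word w [] [] [] hwns]
      simp only [PySem.Chars.split₀.go, List.append_nil]
      simp [List.isEmpty_iff, hwne]
    | cons w2 tail2 =>
      show PySem.Chars.split₀.go (PySem.Chars.join [' '] (w :: w2 :: tail2)) [] [] = _
      rw [PySem.Chars.join_cons_cons, List.append_assoc, pv_go_word w _ [] [] hwns,
        List.append_nil]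
      show PySem.Chars.split₀.go (' ' :: PySem.Chars.join [' '] (w2 :: tail2)) w.reverse [] = _
      simp only [PySem.Chars.split₀.go, show PySem.Chars.isspace ' ' = true from by decide,
        if_true, List.isEmpty_iff, List.reverse_eq_nil_iff, hwne, if_false, List.reverse_reverse]
      rw [pv_go_acc]
      simp only [List.reverse_cons, List.reverse_nil, List.nil_append]
      rw [show PySem.Chars.split₀.go (PySem.Chars.join [' '] (w2 :: tail2)) [] [] =
        PySem.Chars.split₀ (PySem.Chars.join [' '] (w2 :: tail2)) from rfl,
        ih (by simp) (fun x hx => h x (by simp [hx]))]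
      rfl

-- string-level corollaries
theorem pv_mem_str_split₀ (s w : String) (hw : w ∈ PySem.Str.split₀ s) :
    w.toList ≠ [] ∧ ∀ c ∈ w.toList, PySem.Chars.isspace c = false := by
  have : w.toList ∈ (PySem.Str.split₀ s).map String.toList := List.mem_map_of_mem hw
  rw [PySem.Str.split₀_map_toList] at this
  exact pv_go_mem s.toList [] [] (by simp) (by simp) w.toList this

theorem pv_str_split₀_join (ws : List String) (hne : ws ≠ [])
    (h : ∀ w ∈ ws, w.toList ≠ [] ∧ ∀ c ∈ w.toList, PySem.Chars.isspace c = false) :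
    PySem.Str.split₀ (PySem.Str.join " " ws) = ws := by
  have hinj : Function.Injective (List.map String.toList) :=
    List.map_injective_iff.mpr (fun a b hab => String.toList_inj.mp hab)
  apply hinj
  rw [PySem.Str.split₀_map_toList, PySem.Str.toList_join]
  exact pv_split₀_join (ws.map String.toList) (by simpa using hne)
    (by intro w hw; obtain ⟨x, hx, rfl⟩ := List.mem_map.mp hw; exact h x hx)

-- ---- windows and the per-description emitted phrase list (A's view) ----
def pvStop : List String := ["the", "a", "an", "of", "in", "and", "or", "for"]

def pvOkW (w : String) : Bool := !pvStop.contains w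

def pvWin (words : List String) (n i : Int) : List String :=
  PySem.List.slice words (some i) (some (i + n))

def pvOk (words : List String) (n : Int) (i : Int) : Bool :=
  (pvWin words n i).all pvOkW

def pvEmitN (words : List String) (n : Int) : List String :=
  ((PySem.List.pyRange 0 ((words.length : Int) - n + 1) 1).filter (pvOk words n)).map
    (fun i => PySem.Str.join " " (pvWin words n i))

def pvEmit (words : List String) : List String :=
  pvEmitN words 2 ++ pvEmitN words 3 ++ pvEmitN words 4

def pvGL (d : String) : List String :=
  if !(d == "") && !(PySem.Str.strip d == "") then pvEmit (PySem.Str.split₀ (PySem.Str.lower d))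
  else []

theorem pvWin_spec (words : List String) (n i : Int) (hn : 1 ≤ n)
    (hi : i ∈ PySem.List.pyRange 0 ((words.length : Int) - n + 1) 1) :
    pvWin words n i ≠ [] ∧ ∀ w ∈ pvWin words n i, w ∈ words := by
  obtain ⟨h0, hlt⟩ := PySem.List.mem_pyRange_one.mp hi
  obtain ⟨a, rfl⟩ := Int.eq_ofNat_of_zero_le h0
  obtain ⟨nn, rfl⟩ := Int.eq_ofNat_of_zero_le (by omega : (0:Int) ≤ n)
  have hcast : ((a : Int) + (nn : Int)) = ((a + nn : Nat) : Int) := by push_cast; ring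
  have hsl : pvWin words (nn : Int) (a : Int) = (words.drop a).take nn := by
    rw [pvWin, hcast, PySem.List.slice_natCast]
    congr 1
    omega
  have hbound : a + nn ≤ words.length := by omega
  have hlen : ((words.drop a).take nn).length = nn := by
    simp [List.length_take, List.length_drop]
    omega
  constructor
  · rw [hsl]
    intro hcon
    rw [hcon] at hlen
    simp at hlen
    omega
  · intro w hw
    rw [hsl] at hw
    exact List.mem_of_mem_drop (List.mem_of_mem_take hw)

theorem pv_roundtrip (s : String) (n i : Int) (hn : 1 ≤ n)
    (hi : i ∈ PySem.List.pyRange 0 (((PySem.Str.split₀ s).length : Int) - n + 1) 1) :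
    PySem.Str.split₀ (PySem.Str.join " " (pvWin (PySem.Str.split₀ s) n i)) =
      pvWin (PySem.Str.split₀ s) n i := by
  obtain ⟨hne, hsub⟩ := pvWin_spec (PySem.Str.split₀ s) n i hn hi
  exact pv_str_split₀_join _ hne (fun w hw => pv_mem_str_split₀ s w (hsub w hw))

-- ---- A's inner loops fold pvEmit into the dict (statements match the zeta-reduced port bodies) ----
theorem pv_emitN_foldl_modify (s : String) (n : Int) (hn : 1 ≤ n) (d : PySem.Dict String Int) :
    (PySem.List.pyRange 0 (((PySem.Str.split₀ (PySem.Str.lower s)).length : Int) - n + 1) 1).foldl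
      (fun ph i =>
        if (PySem.Str.split₀ (PySem.Str.join " "
              (PySem.List.slice (PySem.Str.split₀ (PySem.Str.lower s)) (some i) (some (i + n))))).any
            (fun w => ["the", "a", "an", "of", "in", "and", "or", "for"].contains w)
          then ph
          else ph.modify (PySem.Str.join " "
              (PySem.List.slice (PySem.Str.split₀ (PySem.Str.lower s)) (some i) (some (i + n)))) 0 (· + 1))
      d
      = (pvEmitN (PySem.Str.split₀ (PySem.Str.lower s)) n).foldl (fun d x => d.modify x 0 (· + 1)) d := by
  rw [pvEmitN, List.foldl_map, List.foldl_filter]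
  apply PySem.List.foldl_congr_mem
  intro acc i hi
  have hrt : PySem.Str.split₀ (PySem.Str.join " "
        (PySem.List.slice (PySem.Str.split₀ (PySem.Str.lower s)) (some i) (some (i + n))))
      = PySem.List.slice (PySem.Str.split₀ (PySem.Str.lower s)) (some i) (some (i + n)) := by
    simpa [pvWin] using pv_roundtrip (PySem.Str.lower s) n i hn hi
  rw [hrt]
  show (if (pvWin (PySem.Str.split₀ (PySem.Str.lower s)) n i).any
          (fun w => pvStop.contains w) = true then acc
        else acc.modify (PySem.Str.join " " (pvWin (PySem.Str.split₀ (PySem.Str.lower s)) n i)) 0 (· + 1))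
      = if pvOk (PySem.Str.split₀ (PySem.Str.lower s)) n i = true
          then acc.modify (PySem.Str.join " " (pvWin (PySem.Str.split₀ (PySem.Str.lower s)) n i)) 0 (· + 1)
          else acc
  rw [pvOk]
  cases hany : (pvWin (PySem.Str.split₀ (PySem.Str.lower s)) n i).any (fun w => pvStop.contains w)
  · have h2 : (pvWin (PySem.Str.split₀ (PySem.Str.lower s)) n i).all pvOkW = true := by
      rw [show pvOkW = fun w => !pvStop.contains w from rfl, List.all_eq_not_any_not]
      simpa using hany
    simp only [h2, Bool.false_eq_true, if_false, if_true]
  · have h2 : (pvWin (PySem.Str.split₀ (PySem.Str.lower s)) n i).all pvOkW = false := by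
      rw [show pvOkW = fun w => !pvStop.contains w from rfl, List.all_eq_not_any_not]
      simpa using hany
    simp only [h2, Bool.false_eq_true, if_false, if_true]

theorem pv_innerA (s : String) (ph : PySem.Dict String Int) :
    ([2, 3, 4] : List Int).foldl (fun ph n =>
        (PySem.List.pyRange 0 (((PySem.Str.split₀ (PySem.Str.lower s)).length : Int) - n + 1) 1).foldl
          (fun ph i =>
          if (PySem.Str.split₀ (PySem.Str.join " "
                (PySem.List.slice (PySem.Str.split₀ (PySem.Str.lower s)) (some i) (some (i + n))))).any
              (fun w => ["the", "a", "an", "of", "in", "and", "or", "for"].contains w) then ph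
          else ph.modify (PySem.Str.join " "
              (PySem.List.slice (PySem.Str.split₀ (PySem.Str.lower s)) (some i) (some (i + n)))) 0 (· + 1)) ph) ph
      = (pvEmit (PySem.Str.split₀ (PySem.Str.lower s))).foldl (fun d x => d.modify x 0 (· + 1)) ph := by
  simp only [List.foldl_cons, List.foldl_nil]
  rw [pv_emitN_foldl_modify s 2 (by norm_num), pv_emitN_foldl_modify s 3 (by norm_num),
    pv_emitN_foldl_modify s 4 (by norm_num), pvEmit]
  rw [List.foldl_append, List.foldl_append]

theorem pv_A_dict (descriptions : List String) :
    (((descriptions.filter (fun d => !(d == "") && !(PySem.Str.strip d == ""))).map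
      (fun d => PySem.Str.split₀ (PySem.Str.lower d))).foldl (fun ph words =>
      ([2, 3, 4] : List Int).foldl (fun ph n =>
        (PySem.List.pyRange 0 ((words.length : Int) - n + 1) 1).foldl (fun ph i =>
          if (PySem.Str.split₀ (PySem.Str.join " "
                (PySem.List.slice words (some i) (some (i + n))))).any
              (fun w => ["the", "a", "an", "of", "in", "and", "or", "for"].contains w) then ph
          else ph.modify (PySem.Str.join " " (PySem.List.slice words (some i) (some (i + n)))) 0 (· + 1))
          ph) ph) (PySem.Dict.empty))
      = PySem.Dict.counter (descriptions.flatMap pvGL) := by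
  rw [List.foldl_map, List.foldl_filter]
  calc _ = descriptions.foldl (fun (ph : PySem.Dict String Int) d =>
            (pvGL d).foldl (fun d x => d.modify x 0 (· + 1)) ph) PySem.Dict.empty := by
        apply PySem.List.foldl_congr_mem
        intro acc d _
        by_cases hg : (!(d == "") && !(PySem.Str.strip d == "")) = true
        · rw [if_pos hg, pvGL, if_pos hg]
          exact pv_innerA d acc
        · rw [if_neg hg, pvGL, if_neg hg]
          rfl
    _ = PySem.Dict.counter (descriptions.flatMap pvGL) := by
        rw [PySem.Dict.counter_eq_foldl, List.flatMap_def, List.foldl_flatten, List.foldl_map]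

-- ---- window machinery over Nat indices ----
def pvWinsAll (n : Nat) (ws : List String) : List (List String) :=
  (List.range (ws.length + 1 - n)).map (fun i => (ws.drop i).take n)

def pvWinsOk (n : Nat) (ws : List String) : List (List String) :=
  (pvWinsAll n ws).filter (fun w => w.all pvOkW)

theorem pv_winsAll_nil (n : Nat) (hn : 1 ≤ n) : pvWinsAll n [] = [] := by
  have h : 0 + 1 - n = 0 := by omega
  simp [pvWinsAll, h]

theorem pv_winsAll_cons (n : Nat) (x : String) (xs : List String) (_hn : 1 ≤ n) :
    pvWinsAll n (x :: xs)
      = (if n ≤ xs.length + 1 then [(x :: xs).take n] else []) ++ pvWinsAll n xs := by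
  by_cases h : n ≤ xs.length + 1
  · rw [if_pos h]
    simp only [pvWinsAll, List.length_cons]
    rw [show xs.length + 1 + 1 - n = (xs.length + 1 - n) + 1 from by omega,
      List.range_succ_eq_map]
    simp [List.map_map, Function.comp_def]
  · rw [if_neg h]
    have h1 : xs.length + 1 + 1 - n = 0 := by omega
    have h2 : xs.length + 1 - n = 0 := by omega
    simp [pvWinsAll, h1, h2]

theorem pv_take_all (p : String → Bool) (l : List String) (n : Nat) (h : l.all p = true) :
    (l.take n).all p = true := by
  rw [List.all_eq_true] at h ⊢
  exact fun x hx => h x (List.mem_of_mem_take hx)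

theorem pv_winsOk_cons_stop (n : Nat) (x : String) (xs : List String) (hn : 1 ≤ n)
    (hx : pvOkW x = false) : pvWinsOk n (x :: xs) = pvWinsOk n xs := by
  rw [pvWinsOk, pv_winsAll_cons n x xs hn, List.filter_append]
  obtain ⟨m, rfl⟩ : ∃ m, n = m + 1 := ⟨n - 1, by omega⟩
  have hall : ((x :: xs).take (m + 1)).all pvOkW = false := by
    simp [List.take_succ_cons, hx]
  split_ifs with h
  · simp only [List.filter_cons, List.filter_nil, hall, Bool.false_eq_true, if_false,
      List.nil_append]
    rfl
  · simp only [List.filter_nil, List.nil_append]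
    rfl

theorem pv_winsOk_split (n : Nat) (seg rest : List String) (hn : 1 ≤ n)
    (hseg : seg.all pvOkW = true)
    (hrest : rest = [] ∨ ∃ y ys, rest = y :: ys ∧ pvOkW y = false) :
    pvWinsOk n (seg ++ rest) = pvWinsAll n seg ++ pvWinsOk n rest := by
  induction seg with
  | nil => simp [pv_winsAll_nil n hn]
  | cons x seg' ih =>
    have hx : pvOkW x = true := (List.all_eq_true.mp hseg) x (by simp)
    have hseg' : seg'.all pvOkW = true :=
      List.all_eq_true.mpr (fun y hy => (List.all_eq_true.mp hseg) y (by simp [hy]))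
    rw [List.cons_append, pvWinsOk, pv_winsAll_cons n x (seg' ++ rest) hn, List.filter_append,
      pv_winsAll_cons n x seg' hn]
    have htail : (pvWinsAll n (seg' ++ rest)).filter (fun w => w.all pvOkW)
        = pvWinsAll n seg' ++ pvWinsOk n rest := ih hseg'
    rw [htail]
    have hhead : (if n ≤ (seg' ++ rest).length + 1 then [(x :: (seg' ++ rest)).take n] else []).filter
          (fun w => w.all pvOkW)
        = (if n ≤ seg'.length + 1 then [(x :: seg').take n] else []) := by
      by_cases h1 : n ≤ seg'.length + 1
      · have hcond : n ≤ (seg' ++ rest).length + 1 := by simp; omega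
        have htk : (x :: (seg' ++ rest)).take n = (x :: seg').take n := by
          rw [show x :: (seg' ++ rest) = (x :: seg') ++ rest from rfl,
            List.take_append_of_le_length (by simpa using h1)]
        have hall : ((x :: seg').take n).all pvOkW = true :=
          pv_take_all pvOkW (x :: seg') n (by simp [hx, hseg'])
        rw [if_pos hcond, if_pos h1, htk]
        simp only [List.filter_cons, List.filter_nil, hall, if_true]
      · by_cases h2 : n ≤ (seg' ++ rest).length + 1
        · rcases hrest with rfl | ⟨y, ys, rfl, hy⟩
          · simp at h2; omega
          · have hlen : (x :: seg').length ≤ n := by simp; omega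
            have htk : (x :: (seg' ++ y :: ys)).take n
                = (x :: seg') ++ (y :: ys).take (n - (x :: seg').length) := by
              rw [show x :: (seg' ++ y :: ys) = (x :: seg') ++ (y :: ys) from rfl,
                List.take_append, List.take_of_length_le hlen]
            have hpos : ∃ m, n - (x :: seg').length = m + 1 := by
              refine ⟨n - (x :: seg').length - 1, ?_⟩
              simp at h2 ⊢
              omega
            obtain ⟨m, hm⟩ := hpos
            have hall : ((x :: (seg' ++ y :: ys)).take n).all pvOkW = false := by
              rw [htk, hm]
              simp [List.take_succ_cons, hy]
            rw [if_pos h2, if_neg h1]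
            simp only [List.filter_cons, List.filter_nil, hall, Bool.false_eq_true, if_false]
        · rw [if_neg h2, if_neg h1]
          simp only [List.filter_nil]
    rw [hhead, List.append_assoc]

-- ---- segmentation: maximal stopword-free runs ----
def pvSegsFrom : List String → List String → List (List String)
  | cur, [] => if cur.isEmpty then [] else [cur]
  | cur, w :: ws =>
      if pvOkW w then pvSegsFrom (cur ++ [w]) ws
      else if cur.isEmpty then pvSegsFrom [] ws else cur :: pvSegsFrom [] ws

theorem pv_winsAll_all_ok (n : Nat) (ws : List String) (h : ws.all pvOkW = true) :
    ∀ w ∈ pvWinsAll n ws, w.all pvOkW = true := by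
  intro w hw
  obtain ⟨i, _, rfl⟩ := List.mem_map.mp hw
  exact pv_take_all pvOkW _ n (by
    rw [List.all_eq_true] at h ⊢
    exact fun x hx => h x (List.mem_of_mem_drop hx))

theorem pv_segsFrom_wins (n : Nat) (hn : 1 ≤ n) :
    ∀ ws cur : List String, cur.all pvOkW = true →
      pvWinsOk n (cur ++ ws) = (pvSegsFrom cur ws).flatMap (pvWinsAll n) := by
  intro ws
  induction ws with
  | nil =>
    intro cur hcur
    rw [List.append_nil, pvSegsFrom]
    by_cases hc : cur.isEmpty
    · rw [if_pos hc]
      rw [List.isEmpty_iff.mp hc]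
      simp [pvWinsOk, pv_winsAll_nil n hn]
    · rw [if_neg hc]
      simp only [List.flatMap_cons, List.flatMap_nil, List.append_nil]
      exact List.filter_eq_self.mpr (pv_winsAll_all_ok n cur hcur)
  | cons w ws' ih =>
    intro cur hcur
    by_cases hw : pvOkW w = true
    · rw [show cur ++ w :: ws' = (cur ++ [w]) ++ ws' from by simp]
      rw [show pvSegsFrom cur (w :: ws') = pvSegsFrom (cur ++ [w]) ws' from by
        simp [pvSegsFrom, hw]]
      exact ih (cur ++ [w]) (by simp [List.all_eq_true] at hcur ⊢; exact ⟨hcur, hw⟩)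
    · have hw' : pvOkW w = false := by simpa using hw
      by_cases hc : cur.isEmpty
      · rw [List.isEmpty_iff.mp hc]
        rw [show pvSegsFrom [] (w :: ws') = pvSegsFrom [] ws' from by
          simp [pvSegsFrom, hw']]
        rw [List.nil_append, pv_winsOk_cons_stop n w ws' hn hw']
        have := ih [] (by simp)
        simpa using this
      · rw [show pvSegsFrom cur (w :: ws') = cur :: pvSegsFrom [] ws' from by
          simp [pvSegsFrom, hw', hc]]
        rw [pv_winsOk_split n cur (w :: ws') hn hcur (Or.inr ⟨w, ws', rfl, hw'⟩),
          pv_winsOk_cons_stop n w ws' hn hw']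
        have := ih [] (by simp)
        simp only [List.nil_append] at this
        rw [this, List.flatMap_cons]

-- ---- bridging A's Int-indexed emission to the Nat window lists ----
theorem pv_win_natCast (words : List String) (n : Int) (hn : 1 ≤ n) (k : Nat) :
    pvWin words n (k : Int) = (words.drop k).take n.toNat := by
  rw [pvWin, show (k : Int) + n = (k : Int) + (n.toNat : Int) from by omega,
    PySem.List.slice_natCast_add]

theorem pv_emitN_eq (words : List String) (n : Int) (hn : 1 ≤ n) :
    pvEmitN words n = (pvWinsOk n.toNat words).map (PySem.Str.join " ") := by
  rw [pvEmitN, PySem.List.pyRange_one]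
  have hM : ((words.length : Int) - n + 1 - 0).toNat = words.length + 1 - n.toNat := by omega
  rw [hM, List.filter_map, List.map_map]
  rw [pvWinsOk, pvWinsAll, List.filter_map, List.map_map]
  have h1 : ∀ k ∈ List.range (words.length + 1 - n.toNat),
      ((fun i => pvOk words n i) ∘ fun k : Nat => (0 : Int) + k) k
        = ((fun w => w.all pvOkW) ∘ fun i : Nat => (words.drop i).take n.toNat) k := by
    intro k _
    simp only [Function.comp_apply, pvOk, zero_add, pv_win_natCast words n hn k]
  rw [List.filter_congr h1]
  apply List.map_congr_left
  intro k hk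
  simp only [Function.comp_apply, zero_add, pv_win_natCast words n hn k]

-- ---- B's loops ----
theorem pv_gramsFold (seg : List String) (n : Int) (hn : 1 ≤ n) (d : PySem.Dict String Int) :
    (PySem.List.pyRange 0 ((seg.length : Int) - n + 1) 1).foldl (fun ph i =>
        ph.modify (PySem.Str.join " " (PySem.List.slice seg (some i) (some (i + n)))) 0 (· + 1)) d
      = ((pvWinsAll n.toNat seg).map (PySem.Str.join " ")).foldl
          (fun d x => d.modify x 0 (· + 1)) d := by
  rw [PySem.List.pyRange_one]
  have hM : ((seg.length : Int) - n + 1 - 0).toNat = seg.length + 1 - n.toNat := by omega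
  rw [hM, List.foldl_map, pvWinsAll, List.map_map, List.foldl_map]
  apply PySem.List.foldl_congr_mem
  intro acc k _
  simp only [Function.comp_apply, zero_add]
  rw [show PySem.List.slice seg (some (k : Int)) (some ((k : Int) + n))
      = (seg.drop k).take n.toNat from by
    simpa [pvWin] using pv_win_natCast seg n hn k]

theorem pv_innerB (segs : List (List String)) (ph : PySem.Dict String Int) :
    ([2, 3, 4] : List Int).foldl (fun ph n =>
        segs.foldl (fun ph seg =>
          (PySem.List.pyRange 0 ((seg.length : Int) - n + 1) 1).foldl (fun ph i =>
            ph.modify (PySem.Str.join " " (PySem.List.slice seg (some i) (some (i + n)))) 0 (· + 1))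
            ph) ph) ph
      = (((segs.flatMap (pvWinsAll 2)).map (PySem.Str.join " ")
          ++ (segs.flatMap (pvWinsAll 3)).map (PySem.Str.join " ")
          ++ (segs.flatMap (pvWinsAll 4)).map (PySem.Str.join " ")).foldl
          (fun d x => d.modify x 0 (· + 1)) ph) := by
  simp only [List.foldl_cons, List.foldl_nil]
  have step : ∀ (n : Int), 1 ≤ n → ∀ (d : PySem.Dict String Int),
      segs.foldl (fun ph seg =>
        (PySem.List.pyRange 0 ((seg.length : Int) - n + 1) 1).foldl (fun ph i =>
          ph.modify (PySem.Str.join " " (PySem.List.slice seg (some i) (some (i + n)))) 0 (· + 1))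
          ph) d
      = ((segs.flatMap (pvWinsAll n.toNat)).map (PySem.Str.join " ")).foldl
          (fun d x => d.modify x 0 (· + 1)) d := by
    intro n hn d
    rw [List.map_flatMap, List.flatMap_def, List.foldl_flatten, List.foldl_map]
    apply PySem.List.foldl_congr_mem
    intro acc seg _
    exact pv_gramsFold seg n hn acc
  rw [step 2 (by norm_num), step 3 (by norm_num), step 4 (by norm_num),
    List.foldl_append, List.foldl_append]
  rfl

-- B's word-loop computes pvSegsFrom
theorem pv_fold_segs (ws : List String) (acc : List (List String)) (cur : List String) :
    (if (ws.foldl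
        (fun (sc : List (List String) × List String) w =>
          if (["the", "a", "an", "of", "in", "and", "or", "for"] : List String).contains w then
            (if sc.2.isEmpty then sc else (sc.1 ++ [sc.2], ([] : List String)))
          else (sc.1, sc.2 ++ [w])) (acc, cur)).2.isEmpty then (ws.foldl
        (fun (sc : List (List String) × List String) w =>
          if (["the", "a", "an", "of", "in", "and", "or", "for"] : List String).contains w then
            (if sc.2.isEmpty then sc else (sc.1 ++ [sc.2], ([] : List String)))
          else (sc.1, sc.2 ++ [w])) (acc, cur)).1
     else (ws.foldl
        (fun (sc : List (List String) × List String) w =>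
          if (["the", "a", "an", "of", "in", "and", "or", "for"] : List String).contains w then
            (if sc.2.isEmpty then sc else (sc.1 ++ [sc.2], ([] : List String)))
          else (sc.1, sc.2 ++ [w])) (acc, cur)).1 ++ [(ws.foldl
        (fun (sc : List (List String) × List String) w =>
          if (["the", "a", "an", "of", "in", "and", "or", "for"] : List String).contains w then
            (if sc.2.isEmpty then sc else (sc.1 ++ [sc.2], ([] : List String)))
          else (sc.1, sc.2 ++ [w])) (acc, cur)).2]) = acc ++ pvSegsFrom cur ws := by
  induction ws generalizing acc cur with
  | nil =>
    simp only [List.foldl_nil, pvSegsFrom]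
    by_cases hc : cur.isEmpty <;> simp [hc]
  | cons w ws' ih =>
    simp only [List.foldl_cons]
    by_cases hw : (["the", "a", "an", "of", "in", "and", "or", "for"] : List String).contains w
    · have hok : pvOkW w = false := by
        simp only [pvOkW, pvStop, hw, Bool.not_true]
      rw [if_pos hw]
      by_cases hc : cur.isEmpty
      · rw [if_pos hc, List.isEmpty_iff.mp hc]
        rw [show pvSegsFrom [] (w :: ws') = pvSegsFrom [] ws' from by simp [pvSegsFrom, hok]]
        have := ih acc []
        rw [List.isEmpty_iff.mp hc] at *
        exact this
      · rw [if_neg hc]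
        rw [show pvSegsFrom cur (w :: ws') = cur :: pvSegsFrom [] ws' from by
          simp [pvSegsFrom, hok, hc]]
        rw [ih (acc ++ [cur]) []]
        simp
    · have hcf : (["the", "a", "an", "of", "in", "and", "or", "for"] : List String).contains w
          = false := by
        cases hc : (["the", "a", "an", "of", "in", "and", "or", "for"] : List String).contains w
        · rfl
        · exact absurd hc hw
      have hok : pvOkW w = true := by
        simp only [pvOkW, pvStop, hcf, Bool.not_false]
      rw [if_neg hw]
      rw [show pvSegsFrom cur (w :: ws') = pvSegsFrom (cur ++ [w]) ws' from by
        simp [pvSegsFrom, hok]]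
      exact ih acc (cur ++ [w])

theorem pv_GL_eq_segs (d : String) (hg : (!(d == "") && !(PySem.Str.strip d == "")) = true) :
    pvGL d
      = ((pvSegsFrom [] (PySem.Str.split₀ (PySem.Str.lower d))).flatMap (pvWinsAll 2)).map (PySem.Str.join " ")
        ++ ((pvSegsFrom [] (PySem.Str.split₀ (PySem.Str.lower d))).flatMap (pvWinsAll 3)).map (PySem.Str.join " ")
        ++ ((pvSegsFrom [] (PySem.Str.split₀ (PySem.Str.lower d))).flatMap (pvWinsAll 4)).map (PySem.Str.join " ") := by
  rw [pvGL, if_pos hg, pvEmit]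
  have h : ∀ n : Int, 1 ≤ n →
      pvEmitN (PySem.Str.split₀ (PySem.Str.lower d)) n
        = ((pvSegsFrom [] (PySem.Str.split₀ (PySem.Str.lower d))).flatMap
            (pvWinsAll n.toNat)).map (PySem.Str.join " ") := by
    intro n hn
    rw [pv_emitN_eq _ n hn]
    congr 1
    have := pv_segsFrom_wins n.toNat (by omega) (PySem.Str.split₀ (PySem.Str.lower d)) [] (by simp)
    simpa using this
  rw [h 2 (by norm_num), h 3 (by norm_num), h 4 (by norm_num)]
  rfl

-- B's dict is the counter of the same flat phrase list
theorem pv_B_dict (descriptions : List String) :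
    (descriptions.foldl (fun sbd d =>
        if !(d == "") && !(PySem.Str.strip d == "") then
          sbd ++ [if ((PySem.Str.split₀ (PySem.Str.lower d)).foldl
        (fun (sc : List (List String) × List String) w =>
          if (["the", "a", "an", "of", "in", "and", "or", "for"] : List String).contains w then
            (if sc.2.isEmpty then sc else (sc.1 ++ [sc.2], ([] : List String)))
          else (sc.1, sc.2 ++ [w])) ([], [])).2.isEmpty then ((PySem.Str.split₀ (PySem.Str.lower d)).foldl
        (fun (sc : List (List String) × List String) w =>
          if (["the", "a", "an", "of", "in", "and", "or", "for"] : List String).contains w then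
            (if sc.2.isEmpty then sc else (sc.1 ++ [sc.2], ([] : List String)))
          else (sc.1, sc.2 ++ [w])) ([], [])).1
                  else ((PySem.Str.split₀ (PySem.Str.lower d)).foldl
        (fun (sc : List (List String) × List String) w =>
          if (["the", "a", "an", "of", "in", "and", "or", "for"] : List String).contains w then
            (if sc.2.isEmpty then sc else (sc.1 ++ [sc.2], ([] : List String)))
          else (sc.1, sc.2 ++ [w])) ([], [])).1 ++ [((PySem.Str.split₀ (PySem.Str.lower d)).foldl
        (fun (sc : List (List String) × List String) w =>
          if (["the", "a", "an", "of", "in", "and", "or", "for"] : List String).contains w then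
            (if sc.2.isEmpty then sc else (sc.1 ++ [sc.2], ([] : List String)))
          else (sc.1, sc.2 ++ [w])) ([], [])).2]]
        else sbd) []).foldl (fun ph segs =>
      ([2, 3, 4] : List Int).foldl (fun ph n =>
        segs.foldl (fun ph seg =>
          (PySem.List.pyRange 0 ((seg.length : Int) - n + 1) 1).foldl (fun ph i =>
            ph.modify (PySem.Str.join " " (PySem.List.slice seg (some i) (some (i + n)))) 0 (· + 1))
            ph) ph) ph) (PySem.Dict.empty)
      = PySem.Dict.counter (descriptions.flatMap pvGL) := by
  rw [PySem.List.foldl_append_if]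
  rw [List.nil_append, List.foldl_map, List.foldl_filter]
  calc _ = descriptions.foldl (fun (ph : PySem.Dict String Int) d =>
            (pvGL d).foldl (fun d x => d.modify x 0 (· + 1)) ph) PySem.Dict.empty := by
        apply PySem.List.foldl_congr_mem
        intro acc d _
        by_cases hg : (!(d == "") && !(PySem.Str.strip d == "")) = true
        · rw [if_pos hg]
          rw [pv_fold_segs (PySem.Str.split₀ (PySem.Str.lower d)) [] [], List.nil_append]
          rw [pv_innerB, pv_GL_eq_segs d hg]
        · rw [if_neg hg, pvGL, if_neg hg]
          rfl
    _ = PySem.Dict.counter (descriptions.flatMap pvGL) := by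
        rw [PySem.Dict.counter_eq_foldl, List.flatMap_def, List.foldl_flatten, List.foldl_map]

-- ===== VERDICT (by name: the statement is the Claim_ definition above) =====
theorem extract_common_phrases_py_spec : Claim_equal_extract_common_phrases_py := by
  intro descriptions min_frequency _
  show extract_common_phrases_py descriptions min_frequency
      = extract_common_phrases_py_alt descriptions min_frequency
  by_cases hd : descriptions = []
  · subst hd; rfl
  · simp only [extract_common_phrases_py, extract_common_phrases_py_alt, if_neg hd]
    rw [pv_A_dict, pv_B_dict]
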